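-- pv_equiv track=rewrite | github.com/zachary-lz-glm/prd-tools | scripts/branch_case.py | _rebuild_targets_in_yaml
-- ===== SOURCE A (Python) =====
-- def _yaml_str(s):
--     """Escape YAML string."""
--     s = str(s).replace("\\", "\\\\").replace('"', '\\"')
--     return f'"{s}"'
--
-- def _rebuild_targets_in_yaml(case_text, targets):
--     """Replace the targets section in case.yaml text with rebuilt targets."""
--     lines = case_text.split("\n")
--     new_lines = []
--     in_targets = False
--     targets_written = False
--
--     i = 0
--     while i < len(lines):
--         line = lines[i]
--         stripped = line.strip()
--
--         if stripped == "targets:" and not targets_written: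
--             in_targets = True
--             # Write new targets section
--             new_lines.append("targets:")
--             for t in targets:
--                 new_lines.append(f'  - layer: {_yaml_str(t["layer"])}')
--                 new_lines.append(f'    repo: {_yaml_str(t["repo"])}')
--                 new_lines.append(f'    base_ref: {_yaml_str(t["base_ref"])}')
--                 new_lines.append(f'    impl_ref: {_yaml_str(t["impl_ref"])}')
--                 if t.get("bundle_id"):
--                     new_lines.append(f'    bundle_id: {_yaml_str(t["bundle_id"])}')
--                 new_lines.append(f'    status: {_yaml_str(t.get("status", "draft"))}')
--             targets_written = True
--             i += 1
--             continue
--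
--         if in_targets:
--             # Skip old target lines until we hit a non-indented line
--             if line and not line[0].isspace() and stripped:
--                 in_targets = False
--                 new_lines.append(line)
--             # else skip (old target content)
--         else:
--             new_lines.append(line)
--
--         i += 1
--
--     return "\n".join(new_lines)
-- ===== SOURCE B (Python) =====
-- def _esc(v):
--     """Char-wise YAML escaping (equivalent to the double .replace of A's _yaml_str)."""
--     return '"' + "".join('\\\\' if c == '\\' else '\\"' if c == '"' else c for c in str(v)) + '"'
--
--
-- def _fields(t):
--     """The (prefix, raw value) pairs emitted for one target."""
--     fields = [("  - layer: ", t["layer"]), ("    repo: ", t["repo"]),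
--               ("    base_ref: ", t["base_ref"]), ("    impl_ref: ", t["impl_ref"])]
--     if t.get("bundle_id"):
--         fields.append(("    bundle_id: ", t["bundle_id"]))
--     fields.append(("    status: ", t.get("status", "draft")))
--     return fields
--
--
-- def _rebuild_targets_in_yaml(case_text, targets):
--     """Replace the targets section: three staged phases (prefix / skip old block / suffix)."""
--     lines = case_text.split("\n")
--     before = []
--     for l in lines:
--         if l.strip() == "targets:":
--             break
--         before.append(l)
--     if len(before) == len(lines):
--         return case_text
--     tail = lines[len(before) + 1:]
--     while tail and (not tail[0] or tail[0][0].isspace()):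
--         tail = tail[1:]
--     block = ["targets:"] + [p + _esc(v) for t in targets for p, v in _fields(t)]
--     return "\n".join(before + block + tail)
-- ===== Notes on version B (the rewrite author's own statement) =====
-- stated objective: simpler
-- what changed: B replaces A's single stateful while-loop with in_targets/targets_written flags by three staged phases (collect the prefix up to the first 'targets:' line, drop the old indented block from the tail, splice in a block built by a comprehension over (prefix,value) field pairs) and a char-wise escaping helper instead of chained .replace calls.
import Mathlib
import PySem

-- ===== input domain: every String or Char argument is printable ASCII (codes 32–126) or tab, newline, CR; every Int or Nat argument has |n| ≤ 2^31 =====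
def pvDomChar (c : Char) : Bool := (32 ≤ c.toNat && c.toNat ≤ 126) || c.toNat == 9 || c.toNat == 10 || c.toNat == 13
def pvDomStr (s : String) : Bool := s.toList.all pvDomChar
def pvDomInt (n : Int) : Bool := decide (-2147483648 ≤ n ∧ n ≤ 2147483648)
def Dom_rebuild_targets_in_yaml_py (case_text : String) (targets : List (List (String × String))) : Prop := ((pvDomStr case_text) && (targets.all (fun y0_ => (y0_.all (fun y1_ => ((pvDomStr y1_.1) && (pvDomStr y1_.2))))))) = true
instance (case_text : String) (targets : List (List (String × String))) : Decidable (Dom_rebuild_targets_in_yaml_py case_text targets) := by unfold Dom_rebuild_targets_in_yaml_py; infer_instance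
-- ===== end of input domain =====

-- B replaces A's single stateful flag-driven while-loop by three staged phases (prefix up to the
-- first 'targets:' line, drop of the old indented block, splice of a block built by mapping over
-- (prefix, value) field pairs) and a char-wise escaping helper; objective: simpler decomposition.

-- ===== PORT A =====

-- _yaml_str(s) = '"' + s.replace("\\", "\\\\").replace('"', '\\"') + '"'
def pvYamlStr (s : List Char) : List Char :=
  ['"'] ++ PySem.Chars.replace (PySem.Chars.replace s ['\\'] ['\\', '\\']) ['"'] ['\\', '"'] ++ ['"']

-- t[k] (first-match association-list lookup; the KeyError case is excluded by Pre_, default unused there)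
def pvGet (t : List (String × String)) (k : String) : List Char :=
  (match t.find? (fun (p : String × String) => p.1 == k) with | some p => p.2 | none => "").toList

-- the lines appended for one target t in A's for-body
def pvTargetLines (t : List (String × String)) : List (List Char) :=
  ["  - layer: ".toList ++ pvYamlStr (pvGet t "layer"),
   "    repo: ".toList ++ pvYamlStr (pvGet t "repo"),
   "    base_ref: ".toList ++ pvYamlStr (pvGet t "base_ref"),
   "    impl_ref: ".toList ++ pvYamlStr (pvGet t "impl_ref")]
  ++ (match t.find? (fun p => p.1 == "bundle_id") with
      | some p => if p.2.toList = [] then [] else ["    bundle_id: ".toList ++ pvYamlStr p.2.toList]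
      | none => [])
  ++ ["    status: ".toList ++
        pvYamlStr (match t.find? (fun p => p.1 == "status") with | some p => p.2.toList | none => "draft".toList)]

-- line.strip() == "targets:"
def pvIsTargets (l : List Char) : Bool := PySem.Chars.strip l == "targets:".toList

-- `line and not line[0].isspace() and stripped`
def pvIsTerminator (l : List Char) : Bool :=
  match l with
  | [] => false
  | c :: _ => !PySem.Chars.isspace c && !(PySem.Chars.strip l == [])

-- A's while-loop over the remaining lines; state = (new_lines accumulator, in_targets, targets_written)
def pvLoopA (targets : List (List (String × String))) :
    List (List Char) → List (List Char) → Bool → Bool → List (List Char)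
  | acc, [], _, _ => acc
  | acc, l :: rest, inT, tw =>
    if pvIsTargets l && !tw then
      pvLoopA targets (targets.foldl (fun a t => a ++ pvTargetLines t) (acc ++ ["targets:".toList]))
        rest true true
    else if inT then
      if pvIsTerminator l then pvLoopA targets (acc ++ [l]) rest false tw
      else pvLoopA targets acc rest true tw
    else pvLoopA targets (acc ++ [l]) rest inT tw

def rebuild_targets_in_yaml_py (case_text : String) (targets : List (List (String × String))) : String :=
  let lines := PySem.Chars.splitOn case_text.toList "\n".toList
  String.ofList (PySem.Chars.join "\n".toList (pvLoopA targets [] lines false false))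

-- ===== PORT B =====

-- B's _esc: char-wise escaping generator joined between the two quote characters
def pvEscB (s : List Char) : List Char :=
  '"' :: (s.flatMap (fun c =>
    if c = '\\' then ['\\', '\\'] else if c = '"' then ['\\', '"'] else [c]) ++ ['"'])

-- B's _fields: the (prefix, raw value) pairs emitted for one target
def pvFieldsB (t : List (String × String)) : List (List Char × List Char) :=
  let fields : List (List Char × List Char) :=
    [("  - layer: ".toList, ((List.lookup "layer" t).getD "").toList),
     ("    repo: ".toList, ((List.lookup "repo" t).getD "").toList),
     ("    base_ref: ".toList, ((List.lookup "base_ref" t).getD "").toList),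
     ("    impl_ref: ".toList, ((List.lookup "impl_ref" t).getD "").toList)]
  let fields :=
    match List.lookup "bundle_id" t with
    | some v => if v.toList.isEmpty then fields else fields ++ [("    bundle_id: ".toList, v.toList)]
    | none => fields
  fields ++ [("    status: ".toList, ((List.lookup "status" t).getD "draft").toList)]

def rebuild_targets_in_yaml_py_alt (case_text : String) (targets : List (List (String × String))) : String :=
  let lines := PySem.Chars.splitOn case_text.toList "\n".toList
  let before := lines.takeWhile (fun l => !(PySem.Chars.strip l == "targets:".toList))
  if before.length = lines.length then case_text
  else
    let tail := (lines.drop (before.length + 1)).dropWhile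
      (fun l => match l with | [] => true | c :: _ => PySem.Chars.isspace c)
    let block := "targets:".toList ::
      targets.flatMap (fun t => (pvFieldsB t).map (fun pv => pv.1 ++ pvEscB pv.2))
    String.ofList (PySem.Chars.join "\n".toList (before ++ block ++ tail))

-- ===== PRECONDITION & SPEC =====
-- Pre_ excludes exactly the inputs where Python A raises KeyError: a 'targets:' line is present
-- and some target dict lacks one of the keys layer/repo/base_ref/impl_ref (B raises there too).
def Pre_rebuild_targets_in_yaml_py (case_text : String) (targets : List (List (String × String))) : Prop :=
  ((PySem.Chars.splitOn case_text.toList "\n".toList).any pvIsTargets) = true →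
    ∀ t ∈ targets, ∀ k ∈ (["layer", "repo", "base_ref", "impl_ref"] : List String),
      (t.find? (fun p => p.1 == k)).isSome = true
instance (case_text : String) (targets : List (List (String × String))) : Decidable (Pre_rebuild_targets_in_yaml_py case_text targets) := by unfold Pre_rebuild_targets_in_yaml_py; infer_instance

def pvWitness_rebuild_targets_in_yaml_py : String × (List (List (String × String))) :=
  ("a: 1\ntargets:\n  - layer: \"x\"\nend: 2",
   [[("layer", "l1"), ("repo", "r1"), ("base_ref", "b1"), ("impl_ref", "i1")]])

def Spec_rebuild_targets_in_yaml_py (case_text : String) (targets : List (List (String × String))) (out : String) : Prop := out = rebuild_targets_in_yaml_py_alt case_text targets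
instance (case_text : String) (targets : List (List (String × String))) (out : String) : Decidable (Spec_rebuild_targets_in_yaml_py case_text targets out) := by unfold Spec_rebuild_targets_in_yaml_py; infer_instance

-- ===== CLAIM (what is proved, stated in full; the proofs are below) =====
def Claim_equal_rebuild_targets_in_yaml_py : Prop := ∀ (case_text : String) (targets : List (List (String × String))), Dom_rebuild_targets_in_yaml_py case_text targets → Pre_rebuild_targets_in_yaml_py case_text targets → Spec_rebuild_targets_in_yaml_py case_text targets (rebuild_targets_in_yaml_py case_text targets)

-- ===== LEMMAS AND PROOFS =====

-- join over a snoc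
theorem pv_join_snoc (sep x : List Char) (xs : List (List Char)) :
    PySem.Chars.join sep (xs ++ [x]) =
      PySem.Chars.join sep xs ++ (if xs = [] then [] else sep) ++ x := by
  induction xs with
  | nil => simp [PySem.Chars.join_singleton, PySem.Chars.join_nil]
  | cons y ys ih =>
    cases ys with
    | nil => simp [PySem.Chars.join_cons_cons, PySem.Chars.join_singleton]
    | cons z zs =>
      simp only [List.cons_append, PySem.Chars.join_cons_cons]
      have hz : z :: (zs ++ [x]) = (z :: zs) ++ [x] := by simp
      rw [hz, ih]
      simp

-- sep.join recomposes what splitOn.go cut apart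
theorem pv_join_go (sep : List Char) (hsep : sep ≠ []) :
    ∀ (fuel : Nat) (l cur : List Char) (acc : List (List Char)), l.length < fuel →
      PySem.Chars.join sep (PySem.Chars.splitOn.go sep fuel l cur acc) =
        PySem.Chars.join sep acc.reverse ++ (if acc = [] then [] else sep) ++ cur.reverse ++ l := by
  intro fuel
  induction fuel with
  | zero => intro l cur acc h; omega
  | succ n ih =>
    intro l cur acc h
    cases l with
    | nil =>
      show PySem.Chars.join sep (cur.reverse :: acc).reverse = _
      rw [List.reverse_cons, pv_join_snoc]
      simp
    | cons c rest =>
      show PySem.Chars.join sep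
        (if sep.isPrefixOf (c :: rest) = true then
          PySem.Chars.splitOn.go sep n (List.drop sep.length (c :: rest)) [] (cur.reverse :: acc)
        else PySem.Chars.splitOn.go sep n rest (c :: cur) acc) = _
      by_cases hp : sep.isPrefixOf (c :: rest) = true
      · rw [if_pos hp]
        have hpre : sep <+: (c :: rest) := List.isPrefixOf_iff_prefix.mp hp
        have hslen : 0 < sep.length := List.length_pos_of_ne_nil hsep
        have hlen : (List.drop sep.length (c :: rest)).length < n := by
          simp only [List.length_drop, List.length_cons] at *
          omega
        have hsepapp : sep ++ List.drop sep.length (c :: rest) = c :: rest :=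
          List.prefix_iff_eq_append.mp hpre
        rw [ih _ _ _ hlen, List.reverse_cons, pv_join_snoc]
        rw [← hsepapp]
        simp [List.reverse_eq_nil_iff]
      · rw [if_neg hp]
        have hlen : rest.length < n := by simp at h; omega
        rw [ih _ _ _ hlen]
        simp

-- '\n'.join(case_text.split('\n')) == case_text
theorem pv_join_splitOn (sep cs : List Char) (hsep : sep ≠ []) :
    PySem.Chars.join sep (PySem.Chars.splitOn cs sep) = cs := by
  rw [PySem.Chars.splitOn, pv_join_go sep hsep _ _ _ _ (by omega)]
  simp [PySem.Chars.join_nil]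

-- the end index of the old targets block
def pvEndIdx (ls : List (List Char)) : Nat :=
  match ls.findIdx? pvIsTerminator with
  | none => ls.length
  | some k => k

-- after the block is written and the old section is over, A copies every remaining line
theorem pv_loopA_done (targets : List (List (String × String))) :
    ∀ (ls acc : List (List Char)), pvLoopA targets acc ls false true = acc ++ ls := by
  intro ls
  induction ls with
  | nil => intro acc; simp [pvLoopA]
  | cons l rest ih =>
    intro acc
    simp only [pvLoopA, Bool.not_true, Bool.and_false, Bool.false_eq_true, if_false]
    rw [ih]
    simp

-- while skipping the old section, A drops exactly the lines before the first terminator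
theorem pv_loopA_skip (targets : List (List (String × String))) :
    ∀ (ls acc : List (List Char)),
      pvLoopA targets acc ls true true = acc ++ ls.drop (pvEndIdx ls) := by
  intro ls
  induction ls with
  | nil => intro acc; simp [pvLoopA, pvEndIdx]
  | cons l rest ih =>
    intro acc
    simp only [pvLoopA, Bool.not_true, Bool.and_false, Bool.false_eq_true, if_false, if_true]
    by_cases ht : pvIsTerminator l = true
    · rw [if_pos ht, pv_loopA_done]
      have h0 : pvEndIdx (l :: rest) = 0 := by
        simp [pvEndIdx, List.findIdx?_cons, ht]
      rw [h0]
      simp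
    · rw [if_neg ht, ih]
      have hs : pvEndIdx (l :: rest) = pvEndIdx rest + 1 := by
        simp only [pvEndIdx, List.findIdx?_cons, Bool.not_eq_true] at *
        rw [ht]
        cases rest.findIdx? pvIsTerminator <;> simp
      rw [hs]
      simp

-- A's whole loop, characterised by the position of the first 'targets:' line
theorem pv_loopA_main (targets : List (List (String × String))) :
    ∀ (ls acc : List (List Char)),
      pvLoopA targets acc ls false false =
        match ls.findIdx? pvIsTargets with
        | none => acc ++ ls
        | some s =>
            acc ++ ls.take s
              ++ targets.foldl (fun a t => a ++ pvTargetLines t) ["targets:".toList]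
              ++ (ls.drop (s + 1)).drop (pvEndIdx (ls.drop (s + 1))) := by
  intro ls
  induction ls with
  | nil => intro acc; simp [pvLoopA]
  | cons l rest ih =>
    intro acc
    by_cases hl : pvIsTargets l = true
    · simp only [pvLoopA, hl, Bool.not_false, Bool.and_true, if_pos]
      rw [pv_loopA_skip]
      simp [List.findIdx?_cons, hl]
    · simp only [pvLoopA, hl, Bool.false_and, Bool.false_eq_true, if_false]
      rw [ih]
      simp only [List.findIdx?_cons, hl, Bool.false_eq_true, if_false]
      cases hfi : rest.findIdx? pvIsTargets with
      | none => simp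
      | some s => simp [List.take_succ_cons]

-- ---- B-side bridging lemmas ----

-- replacing a single character is a flatMap over the characters
theorem pv_replace_go_single (a : Char) (new : List Char) :
    ∀ (fuel : Nat) (l acc : List Char), l.length ≤ fuel →
      PySem.Chars.replace.go [a] new fuel l acc =
        acc.reverse ++ l.flatMap (fun c => if c = a then new else [c]) := by
  intro fuel
  induction fuel with
  | zero =>
    intro l acc h
    have : l = [] := List.eq_nil_of_length_eq_zero (Nat.le_zero.mp h)
    subst this
    simp [PySem.Chars.replace.go]
  | succ n ih =>
    intro l acc h
    cases l with
    | nil => simp [PySem.Chars.replace.go]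
    | cons c t =>
      show (if [a].isPrefixOf (c :: t) = true then
              PySem.Chars.replace.go [a] new n (List.drop 1 (c :: t)) (new.reverse ++ acc)
            else PySem.Chars.replace.go [a] new n t (c :: acc)) = _
      have hlen : t.length ≤ n := by simp at h; omega
      by_cases hc : c = a
      · subst hc
        rw [if_pos (by simp [List.isPrefixOf])]
        rw [List.drop_one, List.tail_cons, ih _ _ hlen]
        simp
      · rw [if_neg (by simp [List.isPrefixOf]; exact fun e => hc e.symm)]
        rw [ih _ _ hlen]
        simp [hc]

theorem pv_replace_single (a : Char) (new s : List Char) :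
    PySem.Chars.replace s [a] new = s.flatMap (fun c => if c = a then new else [c]) := by
  show (if ([a] : List Char).isEmpty = true then _ else PySem.Chars.replace.go [a] new s.length s []) = _
  rw [if_neg (by simp)]
  rw [pv_replace_go_single a new s.length s [] (le_refl _)]
  simp

-- the char-wise escape equals the two chained replaces
theorem pv_flatMap_comp {α : Type} (f g : α → List α) :
    ∀ s : List α, (s.flatMap f).flatMap g = s.flatMap (fun c => (f c).flatMap g) := by
  intro s
  induction s with
  | nil => simp
  | cons c t ih => simp [List.flatMap_cons, List.flatMap_append, ih]

theorem pv_escB_eq (s : List Char) : pvEscB s = pvYamlStr s := by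
  unfold pvEscB pvYamlStr
  rw [pv_replace_single, pv_replace_single, pv_flatMap_comp]
  have hfm : List.flatMap (fun c => if c = '\\' then ['\\', '\\'] else if c = '"' then ['\\', '"'] else [c]) s
      = List.flatMap (fun c => (if c = '\\' then ['\\', '\\'] else [c]).flatMap
          (fun d => if d = '"' then ['\\', '"'] else [d])) s := by
    apply List.flatMap_congr
    intro c _
    by_cases h1 : c = '\\'
    · subst h1; decide
    · by_cases h2 : c = '"'
      · subst h2; decide
      · simp [h1, h2]
  rw [hfm]
  simp

-- first-match dict access: List.lookup equals find? on the key
theorem pv_lookup_eq_find? (t : List (String × String)) (k : String) :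
    List.lookup k t = (t.find? (fun p => p.1 == k)).map Prod.snd := by
  induction t with
  | nil => simp
  | cons p rest ih =>
    by_cases h : p.1 = k
    · simp [List.lookup, List.find?, h]
    · have hb : (k == p.1) = false := by simp [BEq.comm]; exact fun e => h e.symm
      have hb' : (p.1 == k) = false := by simp; exact h
      simp [List.lookup, List.find?, hb, hb', ih]

-- B's dict access with default "" equals A's pvGet
theorem pv_get_eq (t : List (String × String)) (k : String) :
    ((List.lookup k t).getD "").toList = pvGet t k := by
  rw [pv_lookup_eq_find?]
  unfold pvGet
  cases t.find? (fun p => p.1 == k) <;> simp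

-- B's status access with default equals A's match
theorem pv_statusD_eq (t : List (String × String)) :
    ((List.lookup "status" t).getD "draft").toList =
      (match t.find? (fun p => p.1 == "status") with
        | some p => p.2.toList | none => "draft".toList) := by
  rw [pv_lookup_eq_find?]
  cases t.find? (fun p => p.1 == "status") <;> simp

-- one target's lines: A's appended lines = B's mapped field pairs
theorem pv_target_lines_eq (t : List (String × String)) :
    pvTargetLines t = (pvFieldsB t).map (fun pv => pv.1 ++ pvEscB pv.2) := by
  unfold pvTargetLines pvFieldsB
  simp only [pv_get_eq, pv_statusD_eq, pv_lookup_eq_find? t "bundle_id", pv_escB_eq]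
  cases hb : t.find? (fun p => p.1 == "bundle_id") with
  | none => simp
  | some pb =>
    by_cases he : pb.2.toList = []
    · simp [he, List.isEmpty_iff]
    · simp [he, List.isEmpty_iff]

-- takeWhile of the negated predicate, characterised by findIdx?
theorem pv_takeWhile_none (p : List Char → Bool) :
    ∀ ls : List (List Char), ls.findIdx? p = none → ls.takeWhile (fun l => !p l) = ls := by
  intro ls
  induction ls with
  | nil => intro _; simp
  | cons l rest ih =>
    intro h
    rw [List.findIdx?_cons] at h
    by_cases hl : p l = true
    · rw [if_pos hl] at h; simp at h
    · simp only [Bool.not_eq_true] at hl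
      rw [hl] at h
      have hfi : rest.findIdx? p = none := by
        cases hfi2 : rest.findIdx? p with
        | none => rfl
        | some s => rw [hfi2] at h; simp at h
      simp [List.takeWhile_cons, hl, ih hfi]
theorem pv_takeWhile_some (p : List Char → Bool) :
    ∀ (ls : List (List Char)) (s : Nat), ls.findIdx? p = some s →
      ls.takeWhile (fun l => !p l) = ls.take s ∧ s < ls.length := by
  intro ls
  induction ls with
  | nil => intro s h; simp at h
  | cons l rest ih =>
    intro s h
    simp only [List.findIdx?_cons] at h
    by_cases hl : p l = true
    · rw [hl] at h; simp at h
      subst h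
      simp [List.takeWhile_cons, hl]
    · simp only [Bool.not_eq_true] at hl
      rw [hl] at h
      simp only [Bool.false_eq_true, if_false] at h
      cases hfi : rest.findIdx? p with
      | none => rw [hfi] at h; simp at h
      | some k =>
        rw [hfi] at h
        simp only [Option.map_some] at h
        have hsk : s = k + 1 := by
          cases h; rfl
        subst hsk
        obtain ⟨h1, h2⟩ := ih k hfi
        constructor
        · simp [List.takeWhile_cons, hl, h1]
        · simp; omega

-- dropWhile of the negated terminator predicate = drop of pvEndIdx
theorem pv_dropWhile_endIdx :
    ∀ ls : List (List Char),
      ls.dropWhile (fun l => !pvIsTerminator l) = ls.drop (pvEndIdx ls) := by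
  intro ls
  induction ls with
  | nil => simp [pvEndIdx]
  | cons l rest ih =>
    by_cases hl : pvIsTerminator l = true
    · have h0 : pvEndIdx (l :: rest) = 0 := by simp [pvEndIdx, List.findIdx?_cons, hl]
      simp [List.dropWhile_cons, hl, h0]
    · have hs : pvEndIdx (l :: rest) = pvEndIdx rest + 1 := by
        simp only [pvEndIdx, List.findIdx?_cons, Bool.not_eq_true] at *
        rw [hl]
        cases rest.findIdx? pvIsTerminator <;> simp
      simp only [Bool.not_eq_true] at hl
      simp [List.dropWhile_cons, hl, hs, ih]

-- a line starting with a non-space character has a nonempty strip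
theorem pv_strip_ne_nil (c : Char) (rest : List Char) (h : PySem.Chars.isspace c = false) :
    (PySem.Chars.strip (c :: rest) == ([] : List Char)) = false := by
  simp only [PySem.Chars.strip, PySem.Chars.lstrip, PySem.Chars.rstrip]
  rw [List.dropWhile_cons, h]
  simp only [Bool.false_eq_true, if_false, beq_eq_false_iff_ne, ne_eq,
    List.reverse_eq_nil_iff, List.dropWhile_eq_nil_iff]
  intro hall
  have := hall c (by simp)
  rw [h] at this
  exact Bool.false_ne_true this

-- B's skip predicate is the negation of A's terminator predicate
theorem pv_skip_pred_eq :
    (fun l : List Char => match l with | [] => true | c :: _ => PySem.Chars.isspace c)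
      = (fun l => !pvIsTerminator l) := by
  funext l
  cases l with
  | nil => simp [pvIsTerminator]
  | cons c rest =>
    by_cases h : PySem.Chars.isspace c = true
    · simp [pvIsTerminator, h]
    · simp only [Bool.not_eq_true] at h
      simp [pvIsTerminator, h, pv_strip_ne_nil c rest h]

-- ===== VERDICT (by name: the statement is the Claim_ definition above) =====
theorem rebuild_targets_in_yaml_py_spec : Claim_equal_rebuild_targets_in_yaml_py := by
  intro case_text targets _ _
  unfold Spec_rebuild_targets_in_yaml_py rebuild_targets_in_yaml_py rebuild_targets_in_yaml_py_alt
  simp only []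
  rw [pv_loopA_main]
  have hblock : targets.foldl (fun a t => a ++ pvTargetLines t) ["targets:".toList] =
      "targets:".toList ::
        targets.flatMap (fun t => (pvFieldsB t).map (fun pv => pv.1 ++ pvEscB pv.2)) := by
    rw [PySem.List.foldl_append_eq_flatMap, List.singleton_append]
    congr 1
    apply List.flatMap_congr
    intro t _
    exact pv_target_lines_eq t
  have hpred : (fun l : List Char => !(PySem.Chars.strip l == "targets:".toList))
      = (fun l => !pvIsTargets l) := by
    funext l; simp [pvIsTargets]
  rw [hpred, pv_skip_pred_eq]
  cases hfi : (PySem.Chars.splitOn case_text.toList "\n".toList).findIdx? pvIsTargets with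
  | none =>
    rw [pv_takeWhile_none pvIsTargets _ hfi]
    rw [if_pos rfl]
    simp only [List.nil_append]
    rw [pv_join_splitOn _ _ (by decide)]
    rw [String.ofList_toList]
  | some s =>
    obtain ⟨htw, hlt⟩ := pv_takeWhile_some pvIsTargets _ s hfi
    rw [htw]
    have hlen : (List.take s (PySem.Chars.splitOn case_text.toList "\n".toList)).length = s := by
      rw [List.length_take]; omega
    rw [hlen, if_neg (by omega)]
    rw [pv_dropWhile_endIdx, hblock]
    simp
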